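-- pv_equiv track=rewrite | github.com/AfonsoBatista21/PIPL0923_remover | ex6.py | letras
-- ===== SOURCE A (Python) =====
-- def letras(string) -> str:
--     repetição = {}
--     for elm in string:
--         if elm.isalpha():
--             if elm in repetição:
--                 repetição[elm] += 1
--             else:
--                 repetição[elm] = 1
--     return repetição
-- ===== SOURCE B (Python) =====
-- def letras(string) -> str:
--     keys = dict.fromkeys(c for c in string if c.isalpha())
--     return {c: string.count(c) for c in keys}
-- ===== Notes on version B (the rewrite author's own statement) =====
-- stated objective: alternative
-- what changed: Replaces the single incremental counting pass over a dict with a two-phase strategy: first collect the ordered distinct alphabetic characters via dict.fromkeys, then compute each key's frequency with string.count.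
import Mathlib
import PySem

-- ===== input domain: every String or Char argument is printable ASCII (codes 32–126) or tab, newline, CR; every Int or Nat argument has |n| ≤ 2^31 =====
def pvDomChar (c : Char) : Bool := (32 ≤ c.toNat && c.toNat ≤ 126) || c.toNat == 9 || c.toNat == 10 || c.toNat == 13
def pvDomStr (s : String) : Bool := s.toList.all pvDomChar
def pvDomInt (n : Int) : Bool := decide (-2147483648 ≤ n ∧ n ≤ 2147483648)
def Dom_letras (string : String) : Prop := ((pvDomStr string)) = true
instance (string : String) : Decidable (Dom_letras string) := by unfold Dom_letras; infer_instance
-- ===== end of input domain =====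

-- B counts each distinct alphabetic character with string.count instead of A's single incremental dict pass; alternative decomposition, not faster.

-- ===== PORT A =====
-- one pass, incrementing a dict entry per alphabetic character
def letras (string : String) : List (String × Int) :=
  (string.toList.foldl
    (fun (d : PySem.Dict String Int) elm =>
      if PySem.Chars.isalpha elm then
        if d.contains (String.ofList [elm]) then
          d.insert (String.ofList [elm]) (d.getD (String.ofList [elm]) 0 + 1)
        else
          d.insert (String.ofList [elm]) 1
      else d)
    PySem.Dict.empty).items

-- ===== PORT B =====
-- distinct alphabetic keys first (dict.fromkeys = PySem.List.dedup), then string.count per key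
def letras_alt (string : String) : List (String × Int) :=
  let keys := PySem.List.dedup (string.toList.filter (fun c => PySem.Chars.isalpha c))
  (keys.foldl
    (fun (d : PySem.Dict String Int) c =>
      d.insert (String.ofList [c]) ((PySem.Str.count string (String.ofList [c]) : Int)))
    PySem.Dict.empty).items

-- ===== PRECONDITION & SPEC =====
def Spec_letras (string : String) (out : List (String × Int)) : Prop := out = letras_alt string
instance (string : String) (out : List (String × Int)) : Decidable (Spec_letras string out) := by unfold Spec_letras; infer_instance

-- ===== CLAIM (what is proved, stated in full; the proofs are below) =====
def Claim_equal_letras : Prop := ∀ (string : String), Dom_letras string → Spec_letras string (letras string)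

-- ===== LEMMAS AND PROOFS =====

-- the key function c ↦ "c" is injective
lemma mk_inj : Function.Injective (fun c : Char => String.ofList [c]) := by
  intro a b hab
  have := String.ofList_inj.mp hab
  simpa using this

-- Python str.count with a single-character needle is the list count of that character
lemma count_go_single (c : Char) :
    ∀ (l : List Char) (fuel acc : Nat), l.length ≤ fuel →
      PySem.Chars.count.go [c] fuel l acc = acc + l.count c := by
  intro l
  induction l with
  | nil => intro fuel acc _; cases fuel <;> simp [PySem.Chars.count.go]
  | cons h t ih =>
      intro fuel acc hle
      cases fuel with
      | zero => simp at hle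
      | succ f =>
          simp only [List.length_cons, Nat.succ_le_succ_iff] at hle
          by_cases hc : c = h
          · subst hc
            simp [PySem.Chars.count.go, List.isPrefixOf, ih f (acc + 1) hle]
            omega
          · have hpre : [c].isPrefixOf (h :: t) = false := by
              simp [List.isPrefixOf, hc]
            have hhc : ¬ h = c := fun habs => hc habs.symm
            simp [PySem.Chars.count.go, hpre, ih f acc hle, hhc]

lemma chars_count_single (l : List Char) (c : Char) :
    PySem.Chars.count l [c] = l.count c := by
  simp [PySem.Chars.count, count_go_single c l l.length 0 (le_refl _)]

lemma str_count_single (s : String) (c : Char) :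
    PySem.Str.count s (String.ofList [c]) = s.toList.count c := by
  rw [PySem.Str.count_eq]
  simp [chars_count_single]

-- set membership test commutes with the injective key map
lemma contains_map_mk (s : List Char) (c : Char) :
    PySem.Set.contains (s.map (fun c => String.ofList [c])) (String.ofList [c])
      = PySem.Set.contains s c := by
  have hmem : (String.ofList [c]) ∈ s.map (fun c => String.ofList [c]) ↔ c ∈ s := by
    constructor
    · intro h
      obtain ⟨a, ha, he⟩ := List.mem_map.1 h
      have : a = c := mk_inj he
      exact this ▸ ha
    · intro h
      exact List.mem_map_of_mem h
  by_cases h : c ∈ s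
  · simp [PySem.Set.contains, h, hmem.2 h]
  · simp [PySem.Set.contains, h]
    intro x hx he
    exact h ((mk_inj he) ▸ hx)

-- Set.ofList commutes with the injective key map
lemma foldl_add_map_mk (xs : List Char) :
    ∀ (s : List Char),
      List.foldl PySem.Set.add (s.map (fun c => String.ofList [c])) (xs.map (fun c => String.ofList [c]))
        = (List.foldl PySem.Set.add s xs).map (fun c => String.ofList [c]) := by
  induction xs with
  | nil => intro s; rfl
  | cons h t ih =>
      intro s
      simp only [List.map_cons, List.foldl_cons]
      have hc : PySem.Set.add (s.map (fun c => String.ofList [c])) (String.ofList [h])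
          = (PySem.Set.add s h).map (fun c => String.ofList [c]) := by
        simp only [PySem.Set.add, contains_map_mk]
        split_ifs <;> simp
      rw [hc, ih]

lemma ofList_map_mk (xs : List Char) :
    PySem.Set.ofList (xs.map (fun c => String.ofList [c]))
      = (PySem.Set.ofList xs).map (fun c => String.ofList [c]) := by
  rw [PySem.Set.ofList_eq_foldl, PySem.Set.ofList_eq_foldl]
  simpa using foldl_add_map_mk xs []

-- A's loop body equals the canonical counter step
lemma stepA_eq (d : PySem.Dict String Int) (elm : Char) :
    (if PySem.Chars.isalpha elm then
        if d.contains (String.ofList [elm]) then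
          d.insert (String.ofList [elm]) (d.getD (String.ofList [elm]) 0 + 1)
        else
          d.insert (String.ofList [elm]) 1
      else d)
    = (if PySem.Chars.isalpha elm then
        d.insert (String.ofList [elm]) (d.getD (String.ofList [elm]) 0 + 1)
      else d) := by
  by_cases ha : PySem.Chars.isalpha elm = true
  · simp only [ha, if_true]
    by_cases hc : d.contains (String.ofList [elm]) = true
    · simp [hc]
    · have h0 : d.getD (String.ofList [elm]) 0 = 0 := by
        have := (PySem.Dict.get?_eq_none_iff_contains (d := d) (k := String.ofList [elm])).2
          (eq_false_of_ne_true hc)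
        simp [PySem.Dict.getD, this]
      simp [eq_false_of_ne_true hc, h0]
  · simp [eq_false_of_ne_true ha]

-- ===== VERDICT (by name: the statement is the Claim_ definition above) =====
theorem letras_spec : Claim_equal_letras := by
  intro s _
  unfold Spec_letras letras letras_alt
  set l := s.toList with hl
  set p : Char → Bool := fun c => PySem.Chars.isalpha c with hp
  set mk : Char → String := fun c => String.ofList [c] with hmk
  -- A side: the loop is Counter((mk c for c in string if c.isalpha()))
  have hA : (l.foldl
      (fun (d : PySem.Dict String Int) elm =>
        if PySem.Chars.isalpha elm then
          if d.contains (String.ofList [elm]) then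
            d.insert (String.ofList [elm]) (d.getD (String.ofList [elm]) 0 + 1)
          else d.insert (String.ofList [elm]) 1
        else d) PySem.Dict.empty)
      = PySem.Dict.counter ((l.filter p).map mk) := by
    have h1 : (l.foldl
        (fun (d : PySem.Dict String Int) elm =>
          if PySem.Chars.isalpha elm then
            if d.contains (String.ofList [elm]) then
              d.insert (String.ofList [elm]) (d.getD (String.ofList [elm]) 0 + 1)
            else d.insert (String.ofList [elm]) 1
          else d) PySem.Dict.empty)
        = (l.foldl
          (fun (d : PySem.Dict String Int) elm =>
            if p elm then d.insert (mk elm) (d.getD (mk elm) 0 + 1) else d)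
          PySem.Dict.empty) := by
      congr 1
      funext d elm
      exact stepA_eq d elm
    rw [h1, ← List.foldl_filter,
      ← List.foldl_map (f := mk)
        (g := fun (d : PySem.Dict String Int) k => d.insert k (d.getD k 0 + 1)),
      PySem.Dict.foldl_insert_getD_add_one_eq_counter]
  rw [hA, PySem.Dict.items_counter]
  -- B side: inserting fresh distinct keys appends them in order
  have hfresh : ((PySem.List.dedup (l.filter p)).foldl
      (fun (d : PySem.Dict String Int) c =>
        d.insert (mk c) ((PySem.Str.count s (mk c) : Int))) PySem.Dict.empty).items
      = (PySem.List.dedup (l.filter p)).map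
          (fun c => (mk c, (PySem.Str.count s (mk c) : Int))) := by
    rw [PySem.Dict.items_foldl_insert_fresh _ mk _ _
      (fun a _ => PySem.Dict.contains_empty _)
      ((List.Nodup.map mk_inj
        (by simpa [PySem.List.dedup] using PySem.Set.nodup_ofList (l.filter p))))]
    simp [PySem.Dict.empty]
  simp only [PySem.List.dedup] at hfresh ⊢
  rw [hfresh, ofList_map_mk, List.map_map]
  apply List.map_congr_left
  intro c hc
  have hcmem : c ∈ l.filter p := (PySem.Set.mem_ofList _ _).1 hc
  have hpc : p c = true := (List.mem_filter.1 hcmem).2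
  have hcount : ((l.filter p).map mk).count (mk c) = (l.filter p).count c :=
    List.count_map_of_injective _ mk mk_inj c
  have hfc : (l.filter p).count c = l.count c := by
    rw [List.count_filter]
    simp [hpc]
  simp only [Function.comp]
  rw [hcount, hfc, hmk, str_count_single]
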